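-- pv_equiv track=rewrite | github.com/udaykumarswamy/dataprivacyandsecurity | anony_bkp.py | check_recursive_c_l_diversity
-- ===== SOURCE A (Python) =====
-- def check_recursive_c_l_diversity(r_values, c, l):
--     temp = False  # Initialize temp variable to False
--     for i in range(0, len(r_values)):
--         if i == 0:
--             # Remove the second most frequent sensitive value
--             r_prime = r_values[1:]  # Remove the second most frequent sensitive value
--             if r_values[1] < c * sum(r_prime):
--                 temp = True  # Set temp to True if condition is met
--         else:
--             # Remove one sensitive value except the most frequent one
--             r_prime = r_values[:i]   # Remove one sensitive value
--             r_prime = r_values[i+1:]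
--             r_prime = [x - r_values[0] for x in r_prime]  # Subtract the count of the most frequent sensitive value
--             if r_values[0] < c * sum(r_prime):
--                 temp = True  # Set temp to True if condition is met
--
--     return temp
-- ===== SOURCE B (Python) =====
-- def check_recursive_c_l_diversity(r_values, c, l):
--     if not r_values:
--         return False
--     first = r_values[0]
--     rest = r_values[1:]
--     suffix = sum(rest)
--     if rest[0] < c * suffix:
--         return True
--     k = len(rest)
--     for x in rest:
--         suffix -= x
--         k -= 1
--         if first < c * (suffix - first * k):
--             return True
--     return False
-- ===== Notes on version B (the rewrite author's own statement) =====
-- stated objective: faster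
-- what changed: Replaces per-index list slicing/mapping/summing (a fresh O(n) slice and sum for each i) with a single pass that maintains a running suffix sum and remaining-element count, evaluating each condition in O(1) with early exit.
import Mathlib
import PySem

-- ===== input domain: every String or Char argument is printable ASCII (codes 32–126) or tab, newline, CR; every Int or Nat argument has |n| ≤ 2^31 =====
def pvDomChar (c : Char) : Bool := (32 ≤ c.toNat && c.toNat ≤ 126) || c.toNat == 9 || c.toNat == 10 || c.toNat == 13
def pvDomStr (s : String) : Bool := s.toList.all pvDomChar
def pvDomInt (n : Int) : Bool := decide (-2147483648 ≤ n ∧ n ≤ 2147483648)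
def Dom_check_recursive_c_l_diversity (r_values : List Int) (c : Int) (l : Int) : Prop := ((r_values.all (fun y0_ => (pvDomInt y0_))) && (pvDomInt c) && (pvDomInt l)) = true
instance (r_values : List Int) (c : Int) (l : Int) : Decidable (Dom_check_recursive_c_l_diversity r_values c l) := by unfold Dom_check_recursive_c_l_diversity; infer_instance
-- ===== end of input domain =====

-- B replaces A's per-index slice/map/sum (quadratic) with one pass keeping a running
-- suffix sum and remaining-count, each condition checked in O(1) (objective: faster).


-- ===== PORT A =====
-- literal transliteration of A: for i in range(len(r_values)), slicing and summing anew each time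
def check_recursive_c_l_diversity (r_values : List Int) (c : Int) (l : Int) : Bool :=
  (PySem.List.pyRange 0 (r_values.length : Int) 1).foldl
    (fun temp i =>
      if i == 0 then
        let r_prime := PySem.List.slice r_values (some 1)
        if PySem.List.pyGetD r_values 1 0 < c * r_prime.sum then true else temp
      else
        let r0 := PySem.List.pyGetD r_values 0 0
        let r_prime := PySem.List.slice r_values (some (i + 1))
        let r_prime := r_prime.map (fun x => x - r0)
        if r0 < c * r_prime.sum then true else temp)
    false

-- ===== PORT B =====
-- B's loop: early-return for-loop over `rest`, maintaining suffix sum and remaining count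
def pvAltLoop (c first : Int) : List Int → Int → Int → Bool
  | [], _, _ => false
  | x :: xs, suffix, k =>
    let suffix' := suffix - x
    let k' := k - 1
    if first < c * (suffix' - first * k') then true
    else pvAltLoop c first xs suffix' k'

def check_recursive_c_l_diversity_alt (r_values : List Int) (c : Int) (l : Int) : Bool :=
  match r_values with
  | [] => false
  | first :: rest =>
    let suffix := rest.sum
    if PySem.List.pyGetD rest 0 0 < c * suffix then true
    else pvAltLoop c first rest suffix (rest.length : Int)

-- ===== PRECONDITION & SPEC =====
-- Pre_ excludes exactly the length-1 lists, on which A raises IndexError (r_values[1]).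
def Pre_check_recursive_c_l_diversity (r_values : List Int) (c : Int) (l : Int) : Prop :=
  r_values.length ≠ 1
instance (r_values : List Int) (c : Int) (l : Int) : Decidable (Pre_check_recursive_c_l_diversity r_values c l) := by unfold Pre_check_recursive_c_l_diversity; infer_instance

def pvWitness_check_recursive_c_l_diversity : List Int × Int × Int := ([3, 1, 1], 2, 2)

def Spec_check_recursive_c_l_diversity (r_values : List Int) (c : Int) (l : Int) (out : Bool) : Prop := out = check_recursive_c_l_diversity_alt r_values c l
instance (r_values : List Int) (c : Int) (l : Int) (out : Bool) : Decidable (Spec_check_recursive_c_l_diversity r_values c l out) := by unfold Spec_check_recursive_c_l_diversity; infer_instance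

-- ===== CLAIM (what is proved, stated in full; the proofs are below) =====
def Claim_equal_check_recursive_c_l_diversity : Prop := ∀ (r_values : List Int) (c : Int) (l : Int), Dom_check_recursive_c_l_diversity r_values c l → Pre_check_recursive_c_l_diversity r_values c l → Spec_check_recursive_c_l_diversity r_values c l (check_recursive_c_l_diversity r_values c l)

-- ===== LEMMAS AND PROOFS =====

-- sum of (x - a) over a list
lemma pv_sum_map_sub (a : Int) : ∀ (xs : List Int), (xs.map (fun x => x - a)).sum = xs.sum - a * xs.length
  | [] => by simp
  | x :: xs => by
    simp only [List.map_cons, List.sum_cons, List.length_cons, pv_sum_map_sub a xs]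
    push_cast
    ring

-- folding an "if p i then true else acc" loop is init || any
lemma pv_foldl_or (p : Int → Bool) : ∀ (L : List Int) (b : Bool),
    L.foldl (fun acc i => if p i then true else acc) b = (b || L.any p)
  | [], b => by simp
  | x :: L, b => by
    rw [List.foldl_cons, pv_foldl_or p L]
    by_cases h : p x = true <;> simp [h]

-- any over pyRange a (a+m) as any over List.range m
lemma pv_any_pyRange (P : Int → Bool) : ∀ (m : Nat) (a : Int),
    (PySem.List.pyRange a (a + m) 1).any P = (List.range m).any (fun j => P (a + j))
  | 0, a => by
    rw [PySem.List.pyRange_one_eq_nil (by omega)]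
    simp
  | m + 1, a => by
    have hb : a + ((m + 1 : Nat) : Int) = (a + 1) + (m : Nat) := by push_cast; ring
    rw [hb, PySem.List.pyRange_one_cons (by omega : a < a + 1 + (m : Nat)),
      List.any_cons, pv_any_pyRange P m (a + 1), List.range_succ_eq_map]
    simp only [List.any_cons, List.any_map, Function.comp_def]
    congr 1
    · congr 1
      simp
    · apply List.any_congr rfl
      intro j
      congr 1
      push_cast
      ring

-- the indexed "any" form of the i >= 1 conditions equals B's one-pass loop
lemma pv_key (c first : Int) : ∀ (xs : List Int),
    (List.range xs.length).any
      (fun j => decide (first < c * ((xs.drop (j + 1)).sum - first * ((xs.drop (j + 1)).length : Int))))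
    = pvAltLoop c first xs xs.sum (xs.length : Int)
  | [] => by simp [pvAltLoop]
  | x :: xs => by
    rw [List.length_cons, List.range_succ_eq_map]
    simp only [List.any_cons, List.any_map, Function.comp_def]
    have hloop : pvAltLoop c first (x :: xs) (x :: xs).sum ((xs.length + 1 : Nat) : Int)
        = (if first < c * (xs.sum - first * (xs.length : Int)) then true
           else pvAltLoop c first xs xs.sum (xs.length : Int)) := by
      show (if first < c * ((x :: xs).sum - x - first * (((xs.length + 1 : Nat) : Int) - 1)) then true
            else pvAltLoop c first xs ((x :: xs).sum - x) (((xs.length + 1 : Nat) : Int) - 1)) = _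
      rw [show (x :: xs).sum - x = xs.sum by simp,
          show ((xs.length + 1 : Nat) : Int) - 1 = (xs.length : Int) by push_cast; ring]
    rw [hloop]
    have hrest : (List.range xs.length).any
        (fun j => decide (first < c * (((x :: xs).drop (Nat.succ j + 1)).sum -
          first * (((x :: xs).drop (Nat.succ j + 1)).length : Int))))
        = (List.range xs.length).any
        (fun j => decide (first < c * ((xs.drop (j + 1)).sum - first * ((xs.drop (j + 1)).length : Int)))) := by
      apply List.any_congr rfl
      intro j
      rfl
    rw [hrest, pv_key c first xs]
    by_cases h : first < c * (xs.sum - first * (xs.length : Int)) <;> simp [h]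

-- ===== VERDICT (by name: the statement is the Claim_ definition above) =====
theorem check_recursive_c_l_diversity_spec : Claim_equal_check_recursive_c_l_diversity := by
  intro r_values c l _hdom hpre
  unfold Spec_check_recursive_c_l_diversity
  match r_values with
  | [] =>
    simp [check_recursive_c_l_diversity, check_recursive_c_l_diversity_alt,
      PySem.List.pyRange_one_eq_nil (by omega : (0:Int) ≤ 0)]
  | [first] => exact absurd rfl hpre
  | first :: y :: rest' =>
    have hA : check_recursive_c_l_diversity (first :: y :: rest') c l
        = ((if PySem.List.pyGetD (first :: y :: rest') 1 0
              < c * (PySem.List.slice (first :: y :: rest') (some 1)).sum then true else false) ||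
           (PySem.List.pyRange 1 (1 + ((y :: rest').length : Int)) 1).any
             (fun i => decide (PySem.List.pyGetD (first :: y :: rest') 0 0 <
               c * ((PySem.List.slice (first :: y :: rest') (some (i + 1))).map
                 (fun x => x - PySem.List.pyGetD (first :: y :: rest') 0 0)).sum))) := by
      unfold check_recursive_c_l_diversity
      rw [show (((first :: y :: rest').length : Nat) : Int) = 1 + ((y :: rest').length : Int) by
            simp; ring,
          PySem.List.pyRange_one_cons (by positivity : (0:Int) < 1 + ((y :: rest').length : Int)),
          List.foldl_cons]
      simp only [BEq.rfl, if_true]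
      rw [PySem.List.foldl_congr_mem _ _
            (fun acc i => if decide (PySem.List.pyGetD (first :: y :: rest') 0 0 <
               c * ((PySem.List.slice (first :: y :: rest') (some (i + 1))).map
                 (fun x => x - PySem.List.pyGetD (first :: y :: rest') 0 0)).sum) = true
              then true else acc) _
            (by
              intro acc i hi
              rw [PySem.List.mem_pyRange_one] at hi
              have : (i == 0) = false := by simp; omega
              simp only [this, Bool.false_eq_true, if_false, decide_eq_true_eq])]
      rw [pv_foldl_or]
      norm_num
    rw [hA, show (1 : Int) + ((y :: rest').length : Int) = 1 + ((y :: rest').length : Nat) by push_cast; ring,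
       pv_any_pyRange _ (y :: rest').length 1]
    have hany : (List.range (y :: rest').length).any
        (fun j => decide (PySem.List.pyGetD (first :: y :: rest') 0 0 <
          c * ((PySem.List.slice (first :: y :: rest') (some ((1 : Int) + (j : Int) + 1))).map
            (fun x => x - PySem.List.pyGetD (first :: y :: rest') 0 0)).sum))
        = (List.range (y :: rest').length).any
        (fun j => decide (first < c * (((y :: rest').drop (j + 1)).sum -
          first * (((y :: rest').drop (j + 1)).length : Int)))) := by
      apply List.any_congr rfl
      intro j
      have h0 : PySem.List.pyGetD (first :: y :: rest') 0 0 = first := by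
        rw [PySem.List.pyGetD_ofNat']
        rfl
      have hslice : PySem.List.slice (first :: y :: rest') (some ((1 : Int) + (j : Int) + 1))
          = (y :: rest').drop (j + 1) := by
        rw [PySem.List.slice_from _ (by positivity : (0:Int) ≤ 1 + (j : Int) + 1),
            show ((1 : Int) + (j : Int) + 1) = ((j + 2 : Nat) : Int) by push_cast; ring,
            Int.toNat_natCast]
        rfl
      rw [h0, hslice, pv_sum_map_sub]
    rw [hany, pv_key]
    have h1 : PySem.List.pyGetD (first :: y :: rest') 1 0 = PySem.List.pyGetD (y :: rest') 0 0 := by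
      rw [PySem.List.pyGetD_ofNat', PySem.List.pyGetD_ofNat']
      rfl
    have hs1 : PySem.List.slice (first :: y :: rest') (some 1) = y :: rest' := by
      rw [PySem.List.slice_from _ (by norm_num : (0:Int) ≤ 1)]
      rfl
    show _ = check_recursive_c_l_diversity_alt (first :: y :: rest') c l
    unfold check_recursive_c_l_diversity_alt
    rw [h1, hs1]
    by_cases hc : PySem.List.pyGetD (y :: rest') 0 0 < c * (y :: rest').sum
    · simp only [if_pos hc, Bool.true_or]
    · simp only [if_neg hc, Bool.false_or]
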